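-- pv_equiv track=rewrite | github.com/qiqi-impact/cp | leetcode/1725.py | countGoodRectangles
-- ===== SOURCE A (Python) =====
-- from typing import List
--
-- def countGoodRectangles(rectangles: List[List[int]]) -> int:
--     mx = 0
--     for x, y in rectangles:
--         mx = max(mx, min(x,y))
--     ret = 0
--     for x, y in rectangles:
--         ret += min(x,y)==mx
--     return ret
-- ===== SOURCE B (Python) =====
-- def countGoodRectangles(rectangles):
--     mx = 0
--     count = 0
--     for x, y in rectangles:
--         m = x if x < y else y
--         if m > mx:
--             mx = m
--             count = 1
--         elif m == mx:
--             count += 1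
--     return count
-- ===== Notes on version B (the rewrite author's own statement) =====
-- stated objective: alternative
-- what changed: Fuses A's two passes (first compute the max min-side, then count rectangles attaining it) into a single pass threading (mx, count) with reset-on-new-max logic.
import Mathlib
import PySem

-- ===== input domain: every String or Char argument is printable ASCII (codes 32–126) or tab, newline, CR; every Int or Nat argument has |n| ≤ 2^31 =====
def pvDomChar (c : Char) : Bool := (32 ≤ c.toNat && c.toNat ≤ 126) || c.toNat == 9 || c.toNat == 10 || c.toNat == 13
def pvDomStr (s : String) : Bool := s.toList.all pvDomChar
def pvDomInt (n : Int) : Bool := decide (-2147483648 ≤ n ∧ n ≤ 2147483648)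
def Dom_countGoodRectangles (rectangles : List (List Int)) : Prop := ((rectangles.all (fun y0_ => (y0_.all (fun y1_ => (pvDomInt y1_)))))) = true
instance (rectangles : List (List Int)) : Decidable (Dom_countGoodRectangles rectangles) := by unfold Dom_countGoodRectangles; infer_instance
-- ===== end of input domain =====

-- One honest line: B fuses A's two passes into one pass threading (mx, count); alternative decomposition, same O(n) cost.

-- ===== PORT A =====
-- unpacking 'for x, y in rectangles' assumes each row has exactly two entries (else Python raises ValueError);
-- malformed rows are excluded by Pre_ below, the 0 here is an arbitrary total-izing value never reached under Pre_.
def pvMinA (r : List Int) : Int :=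
  match r with
  | [x, y] => min x y
  | _ => 0

def countGoodRectangles (rectangles : List (List Int)) : Int :=
  let mx := rectangles.foldl (fun mx r => max mx (pvMinA r)) 0
  rectangles.foldl (fun ret r => ret + (if pvMinA r = mx then 1 else 0)) 0

-- ===== PORT B =====
-- same unpacking assumption as A; 'm = x if x < y else y'
def pvMinB (r : List Int) : Int :=
  match r with
  | [x, y] => if x < y then x else y
  | _ => 0

def pvStepB (s : Int × Int) (r : List Int) : Int × Int :=
  let m := pvMinB r
  if m > s.1 then (m, 1)
  else if m = s.1 then (s.1, s.2 + 1)
  else s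

def countGoodRectangles_alt (rectangles : List (List Int)) : Int :=
  (rectangles.foldl pvStepB (0, 0)).2

-- ===== PRECONDITION & SPEC =====
-- Pre_ excludes exactly the inputs where Python A raises (ValueError on unpacking a row whose length is not 2).
def Pre_countGoodRectangles (rectangles : List (List Int)) : Prop :=
  ∀ r ∈ rectangles, r.length = 2
instance (rectangles : List (List Int)) : Decidable (Pre_countGoodRectangles rectangles) := by
  unfold Pre_countGoodRectangles; infer_instance

def pvWitness_countGoodRectangles : List (List Int) := [[5, 8], [3, 9], [5, 12], [16, 5]]

def Spec_countGoodRectangles (rectangles : List (List Int)) (out : Int) : Prop := out = countGoodRectangles_alt rectangles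
instance (rectangles : List (List Int)) (out : Int) : Decidable (Spec_countGoodRectangles rectangles out) := by unfold Spec_countGoodRectangles; infer_instance

-- ===== CLAIM (what is proved, stated in full; the proofs are below) =====
def Claim_equal_countGoodRectangles : Prop := ∀ (rectangles : List (List Int)), Dom_countGoodRectangles rectangles → Pre_countGoodRectangles rectangles → Spec_countGoodRectangles rectangles (countGoodRectangles rectangles)

-- ===== LEMMAS AND PROOFS =====

theorem pvMin_eq (r : List Int) : pvMinB r = pvMinA r := by
  unfold pvMinA pvMinB
  match r with
  | [] => rfl
  | [_] => rfl
  | [x, y] => simp [min_def]; omega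
  | _ :: _ :: _ :: _ => rfl

def pvMmax (l : List (List Int)) (v : Int) : Int :=
  l.foldl (fun mx r => max mx (pvMinA r)) v

def pvCnt (l : List (List Int)) (v : Int) : Int :=
  ((l.filter (fun r => pvMinA r = v)).length : Int)

theorem le_pvMmax (l : List (List Int)) (v : Int) : v ≤ pvMmax l v := by
  induction l generalizing v with
  | nil => simp [pvMmax]
  | cons r t ih =>
    have := ih (max v (pvMinA r))
    simp only [pvMmax, List.foldl] at *
    exact le_trans (le_max_left _ _) this

theorem pvCnt_cons (r : List Int) (t : List (List Int)) (v : Int) :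
    pvCnt (r :: t) v = (if pvMinA r = v then 1 else 0) + pvCnt t v := by
  by_cases h : pvMinA r = v
  · simp only [pvCnt, List.filter_cons, h, decide_true, if_pos, List.length_cons]
    push_cast
    ring
  · simp [pvCnt, h]

theorem pvFoldB (l : List (List Int)) (mx c : Int) :
    l.foldl pvStepB (mx, c) =
      (pvMmax l mx,
       if pvMmax l mx = mx then c + pvCnt l mx else pvCnt l (pvMmax l mx)) := by
  induction l generalizing mx c with
  | nil => simp [pvMmax, pvCnt]
  | cons r t ih =>
    have hcons : List.foldl pvStepB (mx, c) (r :: t) = List.foldl pvStepB (pvStepB (mx, c) r) t := rfl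
    have hmx : pvMmax (r :: t) mx = pvMmax t (max mx (pvMinA r)) := rfl
    have hstep0 : pvStepB (mx, c) r =
        (if pvMinA r > mx then ((pvMinA r : Int), (1 : Int))
         else if pvMinA r = mx then (mx, c + 1) else (mx, c)) := by
      simp only [pvStepB, pvMin_eq]
    rw [hcons, hmx, hstep0]
    by_cases h1 : pvMinA r > mx
    · rw [if_pos h1, ih]
      have hmax : max mx (pvMinA r) = pvMinA r := max_eq_right (le_of_lt h1)
      rw [hmax]
      have hle := le_pvMmax t (pvMinA r)
      rw [if_neg (show ¬ pvMmax t (pvMinA r) = mx by omega)]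
      by_cases h2 : pvMmax t (pvMinA r) = pvMinA r
      · rw [if_pos h2, h2, pvCnt_cons, if_pos rfl]
      · rw [if_neg h2, pvCnt_cons, if_neg (by omega)]
        exact Prod.ext_iff.mpr ⟨rfl, by ring⟩
    · rw [if_neg h1]
      have hmax : max mx (pvMinA r) = mx := max_eq_left (by omega)
      rw [hmax]
      have hle := le_pvMmax t mx
      by_cases h2 : pvMinA r = mx
      · rw [if_pos h2, ih]
        by_cases h3 : pvMmax t mx = mx
        · rw [if_pos h3, if_pos h3, h3, pvCnt_cons, if_pos h2]
          exact Prod.ext_iff.mpr ⟨rfl, by ring⟩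
        · rw [if_neg h3, if_neg h3, pvCnt_cons, if_neg (by omega)]
          exact Prod.ext_iff.mpr ⟨rfl, by ring⟩
      · rw [if_neg h2, ih]
        by_cases h3 : pvMmax t mx = mx
        · rw [if_pos h3, if_pos h3, h3, pvCnt_cons, if_neg h2]
          exact Prod.ext_iff.mpr ⟨rfl, by ring⟩
        · rw [if_neg h3, if_neg h3, pvCnt_cons, if_neg (by omega)]
          exact Prod.ext_iff.mpr ⟨rfl, by ring⟩

theorem pvFoldA (l : List (List Int)) (v a : Int) :
    l.foldl (fun ret r => ret + (if pvMinA r = v then 1 else 0)) a = a + pvCnt l v := by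
  induction l generalizing a with
  | nil => simp [pvCnt]
  | cons r t ih =>
    simp only [List.foldl]
    rw [ih, pvCnt_cons]
    ring

-- ===== VERDICT (by name: the statement is the Claim_ definition above) =====
theorem countGoodRectangles_spec : Claim_equal_countGoodRectangles := by
  intro l _ _
  unfold Spec_countGoodRectangles countGoodRectangles countGoodRectangles_alt
  rw [pvFoldB, pvFoldA]
  show (0 : Int) + pvCnt l (pvMmax l 0) =
    (if pvMmax l 0 = 0 then 0 + pvCnt l 0 else pvCnt l (pvMmax l 0))
  split_ifs with h
  · rw [h]
  · omega
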